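-- pv_equiv track=rewrite | github.com/weiqi-kids/agent.supplement-product | scripts/diff_kr_hff.py | compare_indexes
-- ===== SOURCE A (Python) =====
-- def compare_indexes(old_index, new_index):
--     """
--     比較新舊索引，找出差異
--     返回: (added_ids, updated_ids, unchanged_ids, removed_ids)
--     """
--     old_ids = set(old_index.keys())
--     new_ids_set = set(new_index.keys())
--
--     # 新增的 ID
--     added_ids = new_ids_set - old_ids
--
--     # 刪除的 ID
--     removed_ids = old_ids - new_ids_set
--
--     # 檢查更新的 ID（REGIST_DT 變化）
--     updated_ids = set()
--     unchanged_ids = set()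
--
--     common_ids = old_ids & new_ids_set
--     for sid in common_ids:
--         old_dt = old_index[sid]['REGIST_DT']
--         new_dt = new_index[sid]['REGIST_DT']
--
--         # 如果 REGIST_DT 變更，視為更新
--         if old_dt != new_dt:
--             updated_ids.add(sid)
--         else:
--             unchanged_ids.add(sid)
--
--     return added_ids, updated_ids, unchanged_ids, removed_ids
-- ===== SOURCE B (Python) =====
-- def compare_indexes(old_index, new_index):
--     """Merge both indexes into one key -> (old_record, new_record) table, then classify
--     each merged entry into exactly one of the four buckets."""
--     merged = {}
--     for sid, rec in old_index.items():
--         merged[sid] = (rec, None)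
--     for sid, rec in new_index.items():
--         prev = merged.get(sid)
--         merged[sid] = (prev[0] if prev is not None else None, rec)
--
--     added, updated, unchanged, removed = set(), set(), set(), set()
--     for sid, (orec, nrec) in merged.items():
--         if orec is None:
--             added.add(sid)
--         elif nrec is None:
--             removed.add(sid)
--         elif orec['REGIST_DT'] != nrec['REGIST_DT']:
--             updated.add(sid)
--         else:
--             unchanged.add(sid)
--     return added, updated, unchanged, removed
-- ===== Notes on version B (the rewrite author's own statement) =====
-- stated objective: alternative
-- what changed: Instead of A's four set operations (two differences, an intersection, and a loop over the intersection), B first merges both indexes into a single key -> (old_record, new_record) table (None marking absence) and then classifies each merged entry into exactly one of the four buckets.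
import Mathlib
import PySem

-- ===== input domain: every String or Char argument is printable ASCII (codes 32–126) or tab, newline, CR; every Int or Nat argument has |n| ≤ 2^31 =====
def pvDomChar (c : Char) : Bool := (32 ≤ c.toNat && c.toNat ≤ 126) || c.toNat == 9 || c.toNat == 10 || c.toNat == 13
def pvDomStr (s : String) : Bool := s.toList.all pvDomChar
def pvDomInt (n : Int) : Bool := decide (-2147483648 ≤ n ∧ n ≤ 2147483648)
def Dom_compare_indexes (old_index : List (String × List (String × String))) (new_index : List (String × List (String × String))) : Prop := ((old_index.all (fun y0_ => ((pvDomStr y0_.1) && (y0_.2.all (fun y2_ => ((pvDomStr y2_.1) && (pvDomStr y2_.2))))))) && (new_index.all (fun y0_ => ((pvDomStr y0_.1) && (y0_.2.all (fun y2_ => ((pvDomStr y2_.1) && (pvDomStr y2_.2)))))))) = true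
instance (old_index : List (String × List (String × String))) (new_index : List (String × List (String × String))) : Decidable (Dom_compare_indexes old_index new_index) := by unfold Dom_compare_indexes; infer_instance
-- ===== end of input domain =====

-- B replaces A's set algebra (two set differences, an intersection, and a loop over the
-- intersection) by a different data organisation: one merged key -> (old_record?, new_record?)
-- table built first, then a single classifying pass over that table; objective: alternative, same O(n+m) cost.

-- ===== PORT A =====
-- rec['REGIST_DT'] on the dict view of a record; the "" default is reached only outside
-- Pre_ (Python raises KeyError there)
def pvDT (rec : List (String × String)) : String :=
  (PySem.Dict.ofList rec).getD "REGIST_DT" ""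

def compare_indexes (old_index : List (String × List (String × String))) (new_index : List (String × List (String × String))) : List String × List String × List String × List String :=
  let od := PySem.Dict.ofList old_index
  let nd := PySem.Dict.ofList new_index
  let old_ids : PySem.Set String := PySem.Set.ofList od.keys
  let new_ids_set : PySem.Set String := PySem.Set.ofList nd.keys
  let added_ids := PySem.Set.diff new_ids_set old_ids
  let removed_ids := PySem.Set.diff old_ids new_ids_set
  let common_ids := PySem.Set.inter old_ids new_ids_set
  let uu := common_ids.foldl
    (fun (acc : PySem.Set String × PySem.Set String) sid =>
      if pvDT (od.getD sid []) != pvDT (nd.getD sid [])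
      then (PySem.Set.add acc.1 sid, acc.2)
      else (acc.1, PySem.Set.add acc.2 sid))
    (PySem.Set.empty, PySem.Set.empty)
  (added_ids, uu.1, uu.2, removed_ids)

-- ===== PORT B =====
-- merged[sid] = (old_record or None, new_record or None), built by two insert loops,
-- then one classifying pass over merged.items()
def compare_indexes_alt (old_index : List (String × List (String × String))) (new_index : List (String × List (String × String))) : List String × List String × List String × List String :=
  let od := PySem.Dict.ofList old_index
  let nd := PySem.Dict.ofList new_index
  let merged0 : PySem.Dict String (Option (List (String × String)) × Option (List (String × String))) :=
    od.items.foldl (fun m p => m.insert p.1 (some p.2, none)) PySem.Dict.empty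
  let merged := nd.items.foldl
    (fun m p => m.insert p.1 ((m.get? p.1).bind (fun pr => pr.1), some p.2)) merged0
  let r := merged.items.foldl
    (fun (acc : PySem.Set String × PySem.Set String × PySem.Set String × PySem.Set String) q =>
      match q.2.1 with
      | none => (PySem.Set.add acc.1 q.1, acc.2)
      | some orec =>
        match q.2.2 with
        | none => (acc.1, acc.2.1, acc.2.2.1, PySem.Set.add acc.2.2.2 q.1)
        | some nrec =>
          if pvDT orec != pvDT nrec
          then (acc.1, PySem.Set.add acc.2.1 q.1, acc.2.2)
          else (acc.1, acc.2.1, PySem.Set.add acc.2.2.1 q.1, acc.2.2.2))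
    (PySem.Set.empty, PySem.Set.empty, PySem.Set.empty, PySem.Set.empty)
  r

-- ===== PRECONDITION & SPEC =====
-- Pre_ excludes exactly the inputs on which Python A raises KeyError: a key present in both
-- dicts whose record (on either side) lacks the 'REGIST_DT' field.
def Pre_compare_indexes (old_index : List (String × List (String × String))) (new_index : List (String × List (String × String))) : Prop :=
  ∀ p ∈ (PySem.Dict.ofList old_index).items,
    (PySem.Dict.ofList new_index).contains p.1 = true →
      (PySem.Dict.ofList p.2).contains "REGIST_DT" = true ∧
      (PySem.Dict.ofList ((PySem.Dict.ofList new_index).getD p.1 [])).contains "REGIST_DT" = true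
instance (old_index : List (String × List (String × String))) (new_index : List (String × List (String × String))) : Decidable (Pre_compare_indexes old_index new_index) := by unfold Pre_compare_indexes; infer_instance

def pvWitness_compare_indexes : (List (String × List (String × String))) × (List (String × List (String × String))) :=
  ([("a", [("REGIST_DT", "1")])], [("a", [("REGIST_DT", "2")]), ("b", [])])

def Spec_compare_indexes (old_index : List (String × List (String × String))) (new_index : List (String × List (String × String))) (out : List String × List String × List String × List String) : Prop := out = compare_indexes_alt old_index new_index
instance (old_index : List (String × List (String × String))) (new_index : List (String × List (String × String))) (out : List String × List String × List String × List String) : Decidable (Spec_compare_indexes old_index new_index out) := by unfold Spec_compare_indexes; infer_instance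

-- ===== CLAIM (what is proved, stated in full; the proofs are below) =====
def Claim_equal_compare_indexes : Prop := ∀ (old_index : List (String × List (String × String))) (new_index : List (String × List (String × String))), Dom_compare_indexes old_index new_index → Pre_compare_indexes old_index new_index → Spec_compare_indexes old_index new_index (compare_indexes old_index new_index)

-- ===== LEMMAS AND PROOFS =====

theorem pv_any_eq {ν : Type} (l : List (String × ν)) (k : String) :
    (l.any fun p => p.1 == k) = decide (k ∈ l.map (fun x => x.1)) := by
  apply Bool.coe_iff_coe.mp
  simp only [List.any_eq_true, decide_eq_true_eq, List.mem_map, beq_iff_eq]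

theorem pv_find?_isSome {ν : Type} (l : List (String × ν)) (k : String) :
    ((l.find? fun p => p.1 == k).isSome) = decide (k ∈ l.map (fun x => x.1)) := by
  apply Bool.coe_iff_coe.mp
  simp only [List.find?_isSome, decide_eq_true_eq, List.mem_map, beq_iff_eq]

theorem pv_contains {ν : Type} (d : PySem.Dict String ν) (k : String) :
    d.contains k = decide (k ∈ d.keys) := by
  simp [PySem.Dict.contains, PySem.Dict.keys, pv_any_eq]

theorem pv_isSome {ν : Type} (d : PySem.Dict String ν) (k : String) :
    (d.get? k).isSome = decide (k ∈ d.keys) := by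
  simp [PySem.Dict.get?, PySem.Dict.keys, pv_find?_isSome]

theorem pv_add_fresh (s : List String) (x : String) (h : x ∉ s) :
    PySem.Set.add s x = s ++ [x] := by
  simp [PySem.Set.add, PySem.Set.contains, h]

-- the classifying pass of A over the common keys
theorem pv_pair_loop (q : String → Bool) :
    ∀ (cs a1 a2 : List String), cs.Nodup → (∀ x ∈ cs, x ∉ a1) → (∀ x ∈ cs, x ∉ a2) →
    cs.foldl
      (fun (acc : PySem.Set String × PySem.Set String) sid =>
        if q sid then (PySem.Set.add acc.1 sid, acc.2) else (acc.1, PySem.Set.add acc.2 sid))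
      (a1, a2)
      = (a1 ++ cs.filter q, a2 ++ cs.filter (fun x => !q x)) := by
  intro cs
  induction cs with
  | nil => intro a1 a2 _ _ _; simp
  | cons a t ih =>
    intro a1 a2 hnd h1 h2
    have hkeep : ∀ (ai : List String), (∀ x ∈ a :: t, x ∉ ai) → ∀ x ∈ t, x ∉ ai :=
      fun ai hi x hx => hi x (by simp [hx])
    have hfresh : ∀ (ai : List String), (∀ x ∈ a :: t, x ∉ ai) → ∀ x ∈ t, x ∉ ai ++ [a] := by
      intro ai hi x hx
      have hne : x ≠ a := by rintro rfl; exact (List.nodup_cons.mp hnd).1 hx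
      simp [List.mem_append, hne]
      exact hi x (by simp [hx])
    rcases hq : q a with _ | _
    · rw [List.foldl_cons, if_neg (by simp [hq]), pv_add_fresh a2 a (h2 a (by simp)),
        ih a1 (a2 ++ [a]) hnd.of_cons (hkeep a1 h1) (hfresh a2 h2)]
      simp [hq]
    · rw [List.foldl_cons, if_pos (by simp [hq]), pv_add_fresh a1 a (h1 a (by simp)),
        ih (a1 ++ [a]) a2 hnd.of_cons (hfresh a1 h1) (hkeep a2 h2)]
      simp [hq]

-- first-match lookup in an items list (definitionally PySem.Dict.get? of the dict holding it)
def pvLook (l : List (String × List (String × String))) (k : String) : Option (List (String × String)) :=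
  (l.find? (fun p => p.1 == k)).map (fun x => x.2)

theorem pvLook_cons (a : String × List (String × String)) (t : List (String × List (String × String))) (k : String) :
    pvLook (a :: t) k = if a.1 == k then some a.2 else pvLook t k := by
  by_cases h : a.1 = k <;> simp [pvLook, h]

theorem pvLook_eq_none (t : List (String × List (String × String))) (k : String)
    (h : k ∉ t.map (fun p => p.1)) : pvLook t k = none := by
  simp only [pvLook, Option.map_eq_none_iff, List.find?_eq_none]
  intro p hp hbeq
  exact h (List.mem_map.mpr ⟨p, hp, (beq_iff_eq.mp hbeq)⟩)

-- B's second loop: folding the new items into the merged table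
theorem pv_merge_items :
    ∀ (l : List (String × List (String × String)))
      (d : PySem.Dict String (Option (List (String × String)) × Option (List (String × String)))),
    d.keys.Nodup → (l.map (fun p => p.1)).Nodup →
    (l.foldl (fun m p => m.insert p.1 ((m.get? p.1).bind (fun pr => pr.1), some p.2)) d).items
      = d.items.map (fun q => match pvLook l q.1 with
          | none => q
          | some nrec => (q.1, (q.2.1, some nrec)))
        ++ (l.filter (fun p => !(d.contains p.1))).map (fun p => (p.1, (none, some p.2))) := by
  intro l
  induction l with
  | nil =>
    intro d _ _
    simp [pvLook]
  | cons a t ih =>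
    intro d hnd hlnd
    have hlndt : (t.map (fun p => p.1)).Nodup := (List.nodup_cons.mp hlnd).2
    have hnotmem : a.1 ∉ t.map (fun p => p.1) := (List.nodup_cons.mp hlnd).1
    have hne : ∀ p ∈ t, p.1 ≠ a.1 := by
      intro p hp h
      exact hnotmem (h ▸ List.mem_map.mpr ⟨p, hp, rfl⟩)
    rw [List.foldl_cons, ih _ (PySem.Dict.nodup_keys_insert d a.1 _ hnd) hlndt]
    have hfilter : t.filter (fun p => !((d.insert a.1 ((d.get? a.1).bind (fun pr => pr.1), some a.2)).contains p.1))
        = t.filter (fun p => !(d.contains p.1)) := by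
      apply List.filter_congr
      intro p hp
      rw [PySem.Dict.contains_insert]
      have : (p.1 == a.1) = false := by simp [hne p hp]
      rw [this]; rfl
    by_cases hc : d.contains a.1 = true
    · rw [PySem.Dict.items_insert_of_contains d _ hc, hfilter, List.map_map]
      have hfa : (a :: t).filter (fun p => !(d.contains p.1)) = t.filter (fun p => !(d.contains p.1)) := by
        simp [hc]
      rw [hfa]
      congr 1
      apply List.map_congr_left
      intro q hq
      by_cases hqa : q.1 = a.1
      · have hget : d.get? a.1 = some q.2 := by
          have : (a.1, q.2) ∈ d.items := by
            have : q = (a.1, q.2) := by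
              cases q; simp_all
            exact this ▸ hq
          exact PySem.Dict.get?_of_mem_items d this hnd
        simp only [Function.comp_apply, hqa, beq_self_eq_true, if_true,
          pvLook_cons, pvLook_eq_none t a.1 hnotmem, hget]
        simp
      · have hbeq : (q.1 == a.1) = false := by simp [hqa]
        have hbeq' : (a.1 == q.1) = false := by simp [Ne.symm hqa]
        simp only [Function.comp_apply, hbeq, Bool.false_eq_true, if_false, pvLook_cons, hbeq']
    · have hc' : d.contains a.1 = false := by simp_all
      have hget : d.get? a.1 = none := by
        have h2 := PySem.Dict.contains_eq_isSome_get? d a.1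
        rw [hc'] at h2
        exact Option.not_isSome_iff_eq_none.mp (by rw [← h2]; simp)
      rw [PySem.Dict.items_insert_of_not_contains d _ hc', hfilter, List.map_append]
      have hfa : (a :: t).filter (fun p => !(d.contains p.1)) = a :: t.filter (fun p => !(d.contains p.1)) := by
        simp [hc']
      rw [hfa, List.map_cons]
      have hmapd : d.items.map (fun q => match pvLook t q.1 with
            | none => q
            | some nrec => (q.1, (q.2.1, some nrec)))
          = d.items.map (fun q => match pvLook (a :: t) q.1 with
            | none => q
            | some nrec => (q.1, (q.2.1, some nrec))) := by
        apply List.map_congr_left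
        intro q hq
        have hqa : q.1 ≠ a.1 := by
          intro h
          have : d.contains a.1 = true := by
            simp only [PySem.Dict.contains, List.any_eq_true]
            exact ⟨q, hq, by simp [h]⟩
          simp [this] at hc'
        have hbeq' : (a.1 == q.1) = false := by simp [Ne.symm hqa]
        rw [pvLook_cons, hbeq']
        rfl
      rw [hmapd]
      simp [pvLook_eq_none t a.1 hnotmem, hget]

-- the Bool classifiers of B's classifying pass over the merged table
def pvClsAq (q : String × (Option (List (String × String)) × Option (List (String × String)))) : Bool :=
  q.2.1.isNone
def pvClsUq (q : String × (Option (List (String × String)) × Option (List (String × String)))) : Bool :=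
  match q.2.1, q.2.2 with
  | some o, some n => pvDT o != pvDT n
  | _, _ => false
def pvClsEq (q : String × (Option (List (String × String)) × Option (List (String × String)))) : Bool :=
  match q.2.1, q.2.2 with
  | some o, some n => !(pvDT o != pvDT n)
  | _, _ => false
def pvClsRq (q : String × (Option (List (String × String)) × Option (List (String × String)))) : Bool :=
  match q.2.1, q.2.2 with
  | some _, none => true
  | _, _ => false

-- B's classifying pass, characterised as four filters
theorem pv_quad_loop :
    ∀ (l : List (String × (Option (List (String × String)) × Option (List (String × String)))))
      (a1 a2 a3 a4 : List String),
    (l.map (fun q => q.1)).Nodup →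
    (∀ x ∈ l.map (fun q => q.1), x ∉ a1) → (∀ x ∈ l.map (fun q => q.1), x ∉ a2) →
    (∀ x ∈ l.map (fun q => q.1), x ∉ a3) → (∀ x ∈ l.map (fun q => q.1), x ∉ a4) →
    l.foldl
      (fun (acc : PySem.Set String × PySem.Set String × PySem.Set String × PySem.Set String) q =>
        match q.2.1 with
        | none => (PySem.Set.add acc.1 q.1, acc.2)
        | some orec =>
          match q.2.2 with
          | none => (acc.1, acc.2.1, acc.2.2.1, PySem.Set.add acc.2.2.2 q.1)
          | some nrec =>
            if pvDT orec != pvDT nrec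
            then (acc.1, PySem.Set.add acc.2.1 q.1, acc.2.2)
            else (acc.1, acc.2.1, PySem.Set.add acc.2.2.1 q.1, acc.2.2.2))
      (a1, a2, a3, a4)
      = (a1 ++ (l.filter pvClsAq).map (fun q => q.1),
         a2 ++ (l.filter pvClsUq).map (fun q => q.1),
         a3 ++ (l.filter pvClsEq).map (fun q => q.1),
         a4 ++ (l.filter pvClsRq).map (fun q => q.1)) := by
  intro l
  induction l with
  | nil => intro a1 a2 a3 a4 _ _ _ _ _; simp
  | cons a t ih =>
    intro a1 a2 a3 a4 hnd h1 h2 h3 h4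
    have hndt : (t.map (fun q => q.1)).Nodup := (by simpa using hnd : _ ∧ _).2
    have hkeep : ∀ (ai : List String), (∀ x ∈ (a :: t).map (fun q => q.1), x ∉ ai) →
        ∀ x ∈ t.map (fun q => q.1), x ∉ ai :=
      fun ai hi x hx => hi x (by simp at hx ⊢; exact Or.inr hx)
    have hfresh : ∀ (ai : List String), (∀ x ∈ (a :: t).map (fun q => q.1), x ∉ ai) →
        ∀ x ∈ t.map (fun q => q.1), x ∉ ai ++ [a.1] := by
      intro ai hi x hx
      have hne : x ≠ a.1 := by
        rintro rfl; exact (List.nodup_cons.mp (by simpa using hnd)).1 hx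
      simp [List.mem_append, hne]
      exact hi x (by simp at hx ⊢; exact Or.inr hx)
    rcases ha1 : a.2.1 with _ | orec
    · rw [List.foldl_cons]
      have hstep : (match a.2.1 with
          | none => (PySem.Set.add a1 a.1, a2, a3, a4)
          | some orec =>
            match a.2.2 with
            | none => (a1, a2, a3, PySem.Set.add a4 a.1)
            | some nrec =>
              if pvDT orec != pvDT nrec
              then (a1, PySem.Set.add a2 a.1, a3, a4)
              else (a1, a2, PySem.Set.add a3 a.1, a4)) = (a1 ++ [a.1], a2, a3, a4) := by
        simp only [ha1]
        rw [pv_add_fresh a1 a.1 (h1 a.1 (by simp))]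
      rw [hstep, ih (a1 ++ [a.1]) a2 a3 a4 hndt (hfresh a1 h1) (hkeep a2 h2) (hkeep a3 h3) (hkeep a4 h4)]
      simp [pvClsAq, pvClsUq, pvClsEq, pvClsRq, ha1]
    · rcases ha2 : a.2.2 with _ | nrec
      · rw [List.foldl_cons]
        have hstep : (match a.2.1 with
            | none => (PySem.Set.add a1 a.1, a2, a3, a4)
            | some orec =>
              match a.2.2 with
              | none => (a1, a2, a3, PySem.Set.add a4 a.1)
              | some nrec =>
                if pvDT orec != pvDT nrec
                then (a1, PySem.Set.add a2 a.1, a3, a4)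
                else (a1, a2, PySem.Set.add a3 a.1, a4)) = (a1, a2, a3, a4 ++ [a.1]) := by
          simp only [ha1, ha2]
          rw [pv_add_fresh a4 a.1 (h4 a.1 (by simp))]
        rw [hstep, ih a1 a2 a3 (a4 ++ [a.1]) hndt (hkeep a1 h1) (hkeep a2 h2) (hkeep a3 h3) (hfresh a4 h4)]
        simp [pvClsAq, pvClsUq, pvClsEq, pvClsRq, ha1, ha2]
      · rcases hdt : (pvDT orec != pvDT nrec) with _ | _
        · rw [List.foldl_cons]
          have hstep : (match a.2.1 with
              | none => (PySem.Set.add a1 a.1, a2, a3, a4)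
              | some orec =>
                match a.2.2 with
                | none => (a1, a2, a3, PySem.Set.add a4 a.1)
                | some nrec =>
                  if pvDT orec != pvDT nrec
                  then (a1, PySem.Set.add a2 a.1, a3, a4)
                  else (a1, a2, PySem.Set.add a3 a.1, a4)) = (a1, a2, a3 ++ [a.1], a4) := by
            simp only [ha1, ha2]
            rw [if_neg (by simp [hdt]), pv_add_fresh a3 a.1 (h3 a.1 (by simp))]
          rw [hstep, ih a1 a2 (a3 ++ [a.1]) a4 hndt (hkeep a1 h1) (hkeep a2 h2) (hfresh a3 h3) (hkeep a4 h4)]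
          simp [pvClsAq, pvClsUq, pvClsEq, pvClsRq, ha1, ha2, hdt]
        · rw [List.foldl_cons]
          have hstep : (match a.2.1 with
              | none => (PySem.Set.add a1 a.1, a2, a3, a4)
              | some orec =>
                match a.2.2 with
                | none => (a1, a2, a3, PySem.Set.add a4 a.1)
                | some nrec =>
                  if pvDT orec != pvDT nrec
                  then (a1, PySem.Set.add a2 a.1, a3, a4)
                  else (a1, a2, PySem.Set.add a3 a.1, a4)) = (a1, a2 ++ [a.1], a3, a4) := by
            simp only [ha1, ha2]
            rw [if_pos (by simp [hdt]), pv_add_fresh a2 a.1 (h2 a.1 (by simp))]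
          rw [hstep, ih a1 (a2 ++ [a.1]) a3 a4 hndt (hkeep a1 h1) (hfresh a2 h2) (hkeep a3 h3) (hkeep a4 h4)]
          simp [pvClsAq, pvClsUq, pvClsEq, pvClsRq, ha1, ha2, hdt]

theorem pv_map_fst_filter {ν : Type} (l : List (String × ν)) (c : String → Bool) :
    (l.filter (fun p => c p.1)).map (fun p => p.1) = (l.map (fun p => p.1)).filter c := by
  rw [List.filter_map]
  rfl

-- ===== VERDICT (by name: the statement is the Claim_ definition above) =====
theorem compare_indexes_spec : Claim_equal_compare_indexes := by
  intro old_index new_index _dom _pre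
  show compare_indexes old_index new_index = compare_indexes_alt old_index new_index
  simp only [compare_indexes, compare_indexes_alt]
  set od := PySem.Dict.ofList old_index with hod
  set nd := PySem.Dict.ofList new_index with hnd
  have hok : od.keys.Nodup := PySem.Dict.nodup_keys_ofList old_index
  have hnk : nd.keys.Nodup := PySem.Dict.nodup_keys_ofList new_index
  have hempty : ∀ (cs : List String), ∀ x ∈ cs, x ∉ (PySem.Set.empty : PySem.Set String) := by
    intro cs x _ h; simp [PySem.Set.empty] at h
  have hm0 := PySem.Dict.items_foldl_insert_fresh od.items (fun p => p.1)
    (fun (p : String × List (String × String)) =>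
      ((some p.2 : Option (List (String × String))), (none : Option (List (String × String)))))
    PySem.Dict.empty (by intro a _; simp) hok
  rw [show (PySem.Dict.empty : PySem.Dict String (Option (List (String × String)) × Option (List (String × String)))).items = [] from rfl, List.nil_append] at hm0
  beta_reduce at hm0
  set merged0 := od.items.foldl (fun m p => m.insert p.1
    ((some p.2 : Option (List (String × String))), (none : Option (List (String × String)))))
    PySem.Dict.empty with hmdef
  have hm0k : merged0.keys = od.keys := by
    rw [PySem.Dict.keys, hm0, List.map_map]
    rfl
  rw [pv_merge_items nd.items merged0 (by rw [hm0k]; exact hok) hnk, hm0]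
  have hmc : (fun (p : String × List (String × String)) => !merged0.contains p.1)
      = (fun p => !od.contains p.1) := by
    funext p
    have : merged0.contains p.1 = od.contains p.1 := by
      simp only [PySem.Dict.contains, hm0, List.any_map]
      rfl
    rw [this]
  rw [hmc]
  have hL : (od.items.map (fun a => ((a.1 : String), ((some a.2 : Option (List (String × String))), (none : Option (List (String × String))))))).map
        (fun q => match pvLook nd.items q.1 with
          | none => q
          | some nrec => (q.1, (q.2.1, some nrec)))
      = od.items.map (fun p => (p.1, ((some p.2 : Option (List (String × String))), nd.get? p.1))) := by
    rw [List.map_map]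
    apply List.map_congr_left
    intro p _
    have hlook : pvLook nd.items p.1 = nd.get? p.1 := rfl
    cases h : nd.get? p.1 <;> simp [Function.comp, hlook, h]
  rw [hL]
  have hLn : (((od.items.map (fun p => ((p.1 : String), ((some p.2 : Option (List (String × String))), nd.get? p.1)))) ++ (nd.items.filter (fun p => !od.contains p.1)).map (fun p => (p.1, ((none : Option (List (String × String))), some p.2)))).map (fun q => q.1)).Nodup := by
    rw [List.map_append, List.map_map, List.map_map]
    show (od.keys ++ (nd.items.filter (fun p => !od.contains p.1)).map (fun p => p.1)).Nodup
    rw [pv_map_fst_filter nd.items (fun k => !od.contains k)]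
    refine List.Nodup.append hok (List.Nodup.filter _ hnk) ?_
    intro x hx hx2
    have hc := (List.mem_filter.mp hx2).2
    rw [pv_contains] at hc
    simp only [Bool.not_eq_eq_eq_not, Bool.not_true, decide_eq_false_iff_not] at hc
    exact hc hx
  rw [pv_quad_loop _ _ _ _ _ hLn (hempty _) (hempty _) (hempty _) (hempty _)]
  rw [PySem.Set.ofList_eq_self_of_nodup od.keys hok, PySem.Set.ofList_eq_self_of_nodup nd.keys hnk,
    pv_pair_loop _ (PySem.Set.inter od.keys nd.keys) _ _ (show (PySem.Set.inter od.keys nd.keys).Nodup from List.Nodup.filter _ hok) (hempty _) (hempty _)]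
  rw [PySem.Dict.items_eq_map_keys od hok []]
  simp only [PySem.Set.empty, List.nil_append, List.filter_append, List.filter_map,
    List.map_append, List.map_map, Function.comp_def, Prod.mk.injEq]
  refine ⟨?_, ?_, ?_, ?_⟩
  · simp only [pvClsAq, Option.isNone_some, Option.isNone_none, List.filter_false,
      List.map_nil, List.nil_append, List.filter_true]
    rw [pv_map_fst_filter nd.items (fun k => !od.contains k)]
    simp only [PySem.Set.diff]
    apply List.filter_congr
    intro x _
    simp [PySem.Set.contains, pv_contains]
  · simp only [pvClsUq, Bool.false_and, List.filter_false, List.map_nil, List.append_nil,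
      List.map_id', PySem.Set.inter, List.filter_filter]
    apply List.filter_congr
    intro x _
    have hc := (pv_isSome nd x).symm
    cases h : nd.get? x with
    | none =>
      rw [h] at hc
      simp [PySem.Set.contains, hc]
    | some nrec =>
      rw [h] at hc
      simp [PySem.Set.contains, hc, PySem.Dict.getD, h]
  · simp only [pvClsEq, Bool.false_and, List.filter_false, List.map_nil, List.append_nil,
      List.map_id', PySem.Set.inter, List.filter_filter]
    apply List.filter_congr
    intro x _
    have hc := (pv_isSome nd x).symm
    cases h : nd.get? x with
    | none =>
      rw [h] at hc
      simp [PySem.Set.contains, hc]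
    | some nrec =>
      rw [h] at hc
      simp [PySem.Set.contains, hc, PySem.Dict.getD, h]
  · simp only [pvClsRq, List.filter_false, List.map_nil, List.append_nil, List.map_id',
      PySem.Set.diff]
    apply List.filter_congr
    intro x _
    have hc := (pv_isSome nd x).symm
    cases h : nd.get? x with
    | none =>
      rw [h] at hc
      simp [PySem.Set.contains, hc]
    | some nrec =>
      rw [h] at hc
      simp [PySem.Set.contains, hc]
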